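-- pv_equiv track=rewrite | github.com/jorgebaptista/advent-of-code | source/2018/day_02/Python/puzzle_1.py | solve
-- ===== SOURCE A (Python) =====
-- def solve(data):
--     #Declares variables for number of ids with double and triple identical letters
--     double_letter_ids = 0
--     triple_letter_ids = 0
--
--     for line in data:
--         has_double = False
--         has_triple = False
--
--         for letter in line:
--             #To reduce unnecessary iterations checks if the ID already has double or triple identical letters
--             if not has_double or not has_triple:
--                 #Checks if it's the first time it has been found 2 identical letters in this ID
--                 if line.count(letter) == 2 and not has_double:
--                     double_letter_ids += 1
--                     has_double = True
--                 if line.count(letter) == 3 and not has_triple: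
--                     triple_letter_ids += 1
--                     has_triple = True
--             else:
--                 #Breaks out of the loop
--                 break
--     # Returns multiplication of double and triple letter IDs as asked by the puzzle
--     return double_letter_ids * triple_letter_ids
-- ===== SOURCE B (Python) =====
-- def solve(data):
--     double_letter_ids = 0
--     triple_letter_ids = 0
--     for line in data:
--         s = sorted(line)
--         runs = []
--         if s:
--             cur = s[0]
--             n = 1
--             for ch in s[1:]:
--                 if ch == cur:
--                     n += 1
--                 else:
--                     runs.append(n)
--                     cur = ch
--                     n = 1
--             runs.append(n)
--         if 2 in runs:
--             double_letter_ids += 1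
--         if 3 in runs:
--             triple_letter_ids += 1
--     return double_letter_ids * triple_letter_ids
-- ===== Notes on version B (the rewrite author's own statement) =====
-- stated objective: alternative
-- what changed: Replaces A's per-letter repeated line.count scan with two first-time flags by sort-then-group: each line is sorted once, consecutive run lengths are collected in one pass, and the line counts as double/triple iff 2/3 occurs among the run lengths.
import Mathlib
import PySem

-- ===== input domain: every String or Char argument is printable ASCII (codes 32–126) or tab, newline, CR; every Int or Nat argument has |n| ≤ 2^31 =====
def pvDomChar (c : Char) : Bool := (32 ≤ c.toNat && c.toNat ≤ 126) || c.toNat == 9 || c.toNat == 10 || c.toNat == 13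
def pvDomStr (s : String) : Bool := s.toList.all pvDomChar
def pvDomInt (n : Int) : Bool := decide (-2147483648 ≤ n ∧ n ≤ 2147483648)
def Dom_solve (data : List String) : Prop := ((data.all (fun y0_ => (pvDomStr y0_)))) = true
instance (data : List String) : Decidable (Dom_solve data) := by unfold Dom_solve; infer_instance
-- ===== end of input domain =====

-- B sorts each line and scans consecutive run lengths instead of A's per-letter repeated line.count scan with flags (a different traversal of the same line).

-- ===== PORT A =====
-- A's inner 'for letter in line' loop with its break and the two first-time flags
def solveLine (line : List Char) : List Char → Bool → Bool → Int → Int → Int × Int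
  | [], _, _, d, t => (d, t)
  | c :: rest, hd, ht, d, t =>
    if !hd || !ht then
      let p1 : Int × Bool := if PySem.Chars.count line [c] == 2 && !hd then (d + 1, true) else (d, hd)
      let p2 : Int × Bool := if PySem.Chars.count line [c] == 3 && !ht then (t + 1, true) else (t, ht)
      solveLine line rest p1.2 p2.2 p1.1 p2.1
    else (d, t)

def solve (data : List String) : Int :=
  let st := data.foldl (fun (p : Int × Int) line =>
    solveLine line.toList line.toList false false p.1 p.2) (0, 0)
  st.1 * st.2

-- ===== PORT B =====
-- one step of B's run-length scan over the sorted line: state (current char, current run length, finished runs)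
def runStep (st : Char × Nat × List Nat) (ch : Char) : Char × Nat × List Nat :=
  if ch == st.1 then (st.1, st.2.1 + 1, st.2.2) else (ch, 1, st.2.2 ++ [st.2.1])

-- runs = consecutive run lengths of sorted(line)
def runsOf : List Char → List Nat
  | [] => []
  | c :: rest => (rest.foldl runStep (c, 1, [])).2.2 ++ [(rest.foldl runStep (c, 1, [])).2.1]

def lineRuns (line : List Char) : List Nat :=
  runsOf (PySem.List.sorted line (fun x => x) false)

def solve_alt (data : List String) : Int :=
  let st := data.foldl (fun (p : Int × Int) line =>
    let runs := lineRuns line.toList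
    (if runs.contains 2 then p.1 + 1 else p.1,
     if runs.contains 3 then p.2 + 1 else p.2)) (0, 0)
  st.1 * st.2

-- ===== PRECONDITION & SPEC =====
def Spec_solve (data : List String) (out : Int) : Prop := out = solve_alt data
instance (data : List String) (out : Int) : Decidable (Spec_solve data out) := by unfold Spec_solve; infer_instance

-- ===== CLAIM (what is proved, stated in full; the proofs are below) =====
def Claim_equal_solve : Prop := ∀ (data : List String), Dom_solve data → Spec_solve data (solve data)

-- ===== LEMMAS AND PROOFS =====

-- str.count with a single-character needle is the character count
lemma chars_count_go_singleton (c : Char) :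
    ∀ (l : List Char) (fuel acc : Nat), l.length ≤ fuel →
      PySem.Chars.count.go [c] fuel l acc = acc + l.count c := by
  intro l
  induction l with
  | nil =>
    intro fuel acc _
    cases fuel <;> simp [PySem.Chars.count.go]
  | cons h t ih =>
    intro fuel acc hfuel
    cases fuel with
    | zero => simp at hfuel
    | succ fuel' =>
      have hfuel' : t.length ≤ fuel' := by simp at hfuel; omega
      by_cases hc : c = h
      · subst hc
        have hp : [c].isPrefixOf (c :: t) = true := by simp [List.isPrefixOf]
        have hdrop : List.drop [c].length (c :: t) = t := by simp
        simp only [PySem.Chars.count.go, hp, if_true, hdrop]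
        rw [ih fuel' (acc + 1) hfuel', List.count_cons_self]
        omega
      · have hp : [c].isPrefixOf (h :: t) = false := by
          simp [List.isPrefixOf]
          exact fun hh => absurd hh hc
        simp only [PySem.Chars.count.go, hp, Bool.false_eq_true, if_false]
        rw [ih fuel' acc hfuel']
        simp [List.count_cons]
        exact fun hh => hc hh.symm

lemma chars_count_singleton (l : List Char) (c : Char) :
    PySem.Chars.count l [c] = l.count c := by
  have h := chars_count_go_singleton c l l.length 0 le_rfl
  simp [PySem.Chars.count, h]

-- A's inner loop counts: +1 if some letter occurs exactly twice (unless already flagged), same for thrice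
lemma solveLine_spec (line : List Char) :
    ∀ (rest : List Char) (hd ht : Bool) (d t : Int),
      solveLine line rest hd ht d t =
        (d + (if hd = false ∧ ∃ c ∈ rest, line.count c = 2 then 1 else 0),
         t + (if ht = false ∧ ∃ c ∈ rest, line.count c = 3 then 1 else 0)) := by
  intro rest
  induction rest with
  | nil => intro hd ht d t; simp [solveLine]
  | cons c rest' ih =>
    intro hd ht d t
    by_cases hflag : hd = true ∧ ht = true
    · obtain ⟨h1, h2⟩ := hflag; subst h1; subst h2
      simp [solveLine]
    · have hcond : (!hd || !ht) = true := by
        rcases Bool.eq_false_or_eq_true hd with h | h <;>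
        rcases Bool.eq_false_or_eq_true ht with h' | h' <;>
        simp_all
      simp only [solveLine, hcond, if_pos, chars_count_singleton]
      rw [ih]
      by_cases h2 : line.count c = 2 <;> by_cases h3 : line.count c = 3 <;>
        rcases Bool.eq_false_or_eq_true hd with hhd | hhd <;>
        rcases Bool.eq_false_or_eq_true ht with hht | hht <;>
        subst hhd <;> subst hht <;>
        simp_all

-- the run-length recursion B's fold implements (proof-side helper)
def goRuns : Char → Nat → List Char → List Nat
  | _, n, [] => [n]
  | c, n, x :: xs => if x = c then goRuns c (n + 1) xs else n :: goRuns x 1 xs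

lemma foldl_runStep_eq (l : List Char) :
    ∀ (c : Char) (n : Nat) (acc : List Nat),
      (l.foldl runStep (c, n, acc)).2.2 ++ [(l.foldl runStep (c, n, acc)).2.1] = acc ++ goRuns c n l := by
  induction l with
  | nil => intro c n acc; simp [goRuns]
  | cons x xs ih =>
    intro c n acc
    by_cases hx : x = c
    · subst hx
      have hs : runStep (x, n, acc) x = (x, n + 1, acc) := by simp [runStep]
      rw [List.foldl_cons, hs, ih x (n + 1) acc]
      simp [goRuns]
    · have hs : runStep (c, n, acc) x = (x, 1, acc ++ [n]) := by simp [runStep, hx]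
      rw [List.foldl_cons, hs, ih x 1 (acc ++ [n])]
      simp [goRuns, hx]

lemma mem_goRuns_iff (k : Nat) :
    ∀ (rest : List Char) (c : Char) (n : Nat), 0 < n → (c :: rest).Pairwise (· ≤ ·) →
      (k ∈ goRuns c n rest ↔ (k = n + rest.count c ∨ ∃ d ∈ rest, d ≠ c ∧ rest.count d = k)) := by
  intro rest
  induction rest with
  | nil => intro c n hn _; simp [goRuns]
  | cons x xs ih =>
    intro c n hn hpw
    have hpw' : (x :: xs).Pairwise (· ≤ ·) := hpw.sublist (List.sublist_cons_self c (x :: xs))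
    by_cases hx : x = c
    · subst hx
      rw [show goRuns x n (x :: xs) = goRuns x (n + 1) xs from by simp [goRuns]]
      rw [ih x (n + 1) (by omega) hpw']
      constructor
      · rintro (h | ⟨d, hd, hdx, hcnt⟩)
        · left; rw [List.count_cons_self]; omega
        · right
          exact ⟨d, List.mem_cons_of_mem x hd, hdx,
            by rw [List.count_cons_of_ne (Ne.symm hdx)]; exact hcnt⟩
      · rintro (h | ⟨d, hd, hdx, hcnt⟩)
        · left; rw [List.count_cons_self] at h; omega
        · rcases List.mem_cons.mp hd with h | h
          · exact absurd h hdx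
          · right
            exact ⟨d, h, hdx, by rw [List.count_cons_of_ne (Ne.symm hdx)] at hcnt; exact hcnt⟩
    · -- c < x, so c does not occur in x :: xs
      have hcx : c ≤ x := (List.pairwise_cons.mp hpw).1 x List.mem_cons_self
      have hclt : c < x := lt_of_le_of_ne hcx (fun h => hx h.symm)
      have hnotc : ∀ e ∈ x :: xs, e ≠ c := by
        intro e he
        rcases List.mem_cons.mp he with h | h
        · subst h; exact hx
        · have hxe : x ≤ e := (List.pairwise_cons.mp hpw').1 e h
          exact fun hh => absurd (hh ▸ hxe) (not_le.mpr hclt)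
      have hcnt0 : (x :: xs).count c = 0 :=
        List.count_eq_zero.mpr (fun hc2 => (hnotc c hc2) rfl)
      rw [show goRuns c n (x :: xs) = n :: goRuns x 1 xs from by simp [goRuns, hx]]
      rw [List.mem_cons, ih x 1 (by omega) hpw', hcnt0]
      constructor
      · rintro (h | h | ⟨d, hd, hdx, hcnt⟩)
        · left; omega
        · right
          exact ⟨x, List.mem_cons_self, hx, by rw [List.count_cons_self]; omega⟩
        · right
          refine ⟨d, List.mem_cons_of_mem x hd, hnotc d (List.mem_cons_of_mem x hd), ?_⟩
          rw [List.count_cons_of_ne (Ne.symm hdx)]; exact hcnt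
      · rintro (h | ⟨d, hd, _, hcnt⟩)
        · left; omega
        · rcases List.mem_cons.mp hd with h | h
          · subst h
            right; left
            rw [List.count_cons_self] at hcnt; omega
          · by_cases hdx : d = x
            · subst hdx
              right; left
              rw [List.count_cons_self] at hcnt; omega
            · right; right
              exact ⟨d, h, hdx, by rw [List.count_cons_of_ne (Ne.symm hdx)] at hcnt; exact hcnt⟩

lemma mem_runsOf_iff (s : List Char) (hpw : s.Pairwise (· ≤ ·)) (k : Nat) :
    k ∈ runsOf s ↔ ∃ d ∈ s, s.count d = k := by
  cases s with
  | nil => simp [runsOf]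
  | cons c rest =>
    show k ∈ (rest.foldl runStep (c, 1, [])).2.2 ++ [(rest.foldl runStep (c, 1, [])).2.1] ↔ _
    rw [foldl_runStep_eq rest c 1 [], List.nil_append]
    rw [mem_goRuns_iff k rest c 1 (by omega) hpw]
    constructor
    · rintro (h | ⟨d, hd, hdc, hcnt⟩)
      · exact ⟨c, List.mem_cons_self, by rw [List.count_cons_self]; omega⟩
      · exact ⟨d, List.mem_cons_of_mem c hd,
          by rw [List.count_cons_of_ne (Ne.symm hdc)]; exact hcnt⟩
    · rintro ⟨d, hd, hcnt⟩
      by_cases hdc : d = c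
      · subst hdc
        left
        rw [List.count_cons_self] at hcnt
        omega
      · rcases List.mem_cons.mp hd with h | h
        · exact absurd h hdc
        · right
          exact ⟨d, h, hdc, by rw [List.count_cons_of_ne (Ne.symm hdc)] at hcnt; exact hcnt⟩

lemma mem_lineRuns_iff (line : List Char) (k : Nat) :
    k ∈ lineRuns line ↔ ∃ d ∈ line, line.count d = k := by
  have hperm : (PySem.List.sorted line (fun x => x) false).Perm line :=
    PySem.List.sorted_perm line (fun x => x) false
  have hpw : (PySem.List.sorted line (fun x => x) false).Pairwise (· ≤ ·) := by
    simpa using PySem.List.sorted_pairwise line (fun x => x)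
  unfold lineRuns
  rw [mem_runsOf_iff _ hpw k]
  constructor
  · rintro ⟨d, hd, hcnt⟩
    exact ⟨d, hperm.mem_iff.mp hd, by rw [← hperm.count_eq d]; exact hcnt⟩
  · rintro ⟨d, hd, hcnt⟩
    exact ⟨d, hperm.mem_iff.mpr hd, by rw [hperm.count_eq d]; exact hcnt⟩

-- the two per-line step functions agree
lemma step_eq (p : Int × Int) (line : String) :
    solveLine line.toList line.toList false false p.1 p.2 =
      (let runs := lineRuns line.toList
       (if runs.contains 2 then p.1 + 1 else p.1,
        if runs.contains 3 then p.2 + 1 else p.2)) := by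
  rw [solveLine_spec]
  by_cases e2 : ∃ c ∈ line.toList, line.toList.count c = 2 <;>
  by_cases e3 : ∃ c ∈ line.toList, line.toList.count c = 3 <;>
  simp [e2, e3, mem_lineRuns_iff]

-- ===== VERDICT (by name: the statement is the Claim_ definition above) =====
theorem solve_spec : Claim_equal_solve := by
  intro data _
  unfold Spec_solve solve solve_alt
  simp only
  have hstep : (fun (p : Int × Int) (line : String) => solveLine line.toList line.toList false false p.1 p.2)
      = (fun (p : Int × Int) (line : String) =>
          (if (lineRuns line.toList).contains 2 then p.1 + 1 else p.1,
           if (lineRuns line.toList).contains 3 then p.2 + 1 else p.2)) := by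
    funext p line
    exact step_eq p line
  rw [hstep]
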